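-- pv_equiv track=rewrite | github.com/darthiruru/VK_algorithms | Seminar_8/can_make_valid_width_deletions.py | can_make_valid_with_deletions
-- ===== SOURCE A (Python) =====
-- def can_make_valid_with_deletions(s: str, k: int) -> bool:
--     balance = 0
--     extra_closed_balance = 0
--     for ch in s:
--         balance += 1 if ch == '(' else -1
--         if balance < 0:
--             extra_closed_balance += 1
--             balance = 0
--     total_needed = balance + extra_closed_balance
--     return total_needed <= k
-- ===== SOURCE B (Python) =====
-- def can_make_valid_with_deletions(s: str, k: int) -> bool:
--     # Pass 1: left-to-right, count unmatched closing symbols (any char != '(')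
--     unmatched_close = 0
--     bal = 0
--     for ch in s:
--         if ch == '(':
--             bal += 1
--         elif bal > 0:
--             bal -= 1
--         else:
--             unmatched_close += 1
--     # Pass 2: right-to-left, count unmatched opening parens
--     unmatched_open = 0
--     bal = 0
--     for ch in reversed(s):
--         if ch != '(':
--             bal += 1
--         elif bal > 0:
--             bal -= 1
--         else:
--             unmatched_open += 1
--     return unmatched_open + unmatched_close <= k
-- ===== Notes on version B (the rewrite author's own statement) =====
-- stated objective: alternative
-- what changed: A makes one pass with a clamped balance plus a deletion counter and tests their sum; B stages two independent scans - a left-to-right scan counting unmatched closing symbols and a right-to-left scan counting unmatched opening parens - and tests the sum of the two counts.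
import Mathlib
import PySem

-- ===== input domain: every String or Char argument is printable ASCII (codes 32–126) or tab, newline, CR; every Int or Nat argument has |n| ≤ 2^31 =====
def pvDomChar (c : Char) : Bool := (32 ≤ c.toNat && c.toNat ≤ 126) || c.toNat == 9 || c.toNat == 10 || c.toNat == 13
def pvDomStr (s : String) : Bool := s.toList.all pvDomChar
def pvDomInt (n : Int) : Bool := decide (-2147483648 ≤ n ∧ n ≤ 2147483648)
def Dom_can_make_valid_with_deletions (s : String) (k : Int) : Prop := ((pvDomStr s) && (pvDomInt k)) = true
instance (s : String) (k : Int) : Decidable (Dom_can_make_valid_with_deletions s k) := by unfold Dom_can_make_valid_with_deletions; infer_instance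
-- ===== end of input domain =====

-- B replaces A's single clamped-balance pass by two independent scans: a forward scan
-- counting unmatched closing symbols and a backward scan counting unmatched opening
-- parens, returning unmatched_open + unmatched_close ≤ k (objective: alternative).

-- ===== PORT A =====
-- step of A's loop: balance += ±1; on underflow count a deletion and reset to 0
def cmvdStepA (p : Int × Int) (ch : Char) : Int × Int :=
  let balance := p.1 + (if ch = '(' then 1 else -1)
  if balance < 0 then (0, p.2 + 1) else (balance, p.2)

def can_make_valid_with_deletions (s : String) (k : Int) : Bool :=
  let r := s.toList.foldl cmvdStepA (0, 0)
  decide (r.1 + r.2 ≤ k)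

-- ===== PORT B =====
-- pass 1 of Source B: state (bal, unmatched_close)
def cmvdPass1Step (p : Int × Int) (ch : Char) : Int × Int :=
  if ch = '(' then (p.1 + 1, p.2)
  else if p.1 > 0 then (p.1 - 1, p.2)
  else (p.1, p.2 + 1)

-- pass 2 of Source B (over reversed(s)): state (bal, unmatched_open)
def cmvdPass2Step (p : Int × Int) (ch : Char) : Int × Int :=
  if ch ≠ '(' then (p.1 + 1, p.2)
  else if p.1 > 0 then (p.1 - 1, p.2)
  else (p.1, p.2 + 1)

def can_make_valid_with_deletions_alt (s : String) (k : Int) : Bool :=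
  let r1 := s.toList.foldl cmvdPass1Step (0, 0)
  let r2 := s.toList.reverse.foldl cmvdPass2Step (0, 0)
  decide (r2.2 + r1.2 ≤ k)

-- ===== PRECONDITION & SPEC =====
def Spec_can_make_valid_with_deletions (s : String) (k : Int) (out : Bool) : Prop := out = can_make_valid_with_deletions_alt s k
instance (s : String) (k : Int) (out : Bool) : Decidable (Spec_can_make_valid_with_deletions s k out) := by unfold Spec_can_make_valid_with_deletions; infer_instance

-- ===== CLAIM (what is proved, stated in full; the proofs are below) =====
def Claim_equal_can_make_valid_with_deletions : Prop := ∀ (s : String) (k : Int), Dom_can_make_valid_with_deletions s k → Spec_can_make_valid_with_deletions s k (can_make_valid_with_deletions s k)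

-- ===== LEMMAS AND PROOFS =====

-- generic clamp-and-count step with weight function f
def cmvdClampStep (f : Char → Int) (p : Int × Int) (c : Char) : Int × Int :=
  if p.1 + f c < 0 then (0, p.2 + 1) else (p.1 + f c, p.2)

-- weighted sum of a char list
def pvSum (f : Char → Int) : List Char → Int
  | [] => 0
  | c :: t => f c + pvSum f t

-- minimum (≤ 0) over all weighted prefix sums
def pvMn (f : Char → Int) : List Char → Int
  | [] => 0
  | c :: t => min 0 (f c + pvMn f t)

theorem pvMn_nonpos (f : Char → Int) (xs : List Char) : pvMn f xs ≤ 0 := by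
  cases xs with
  | nil => simp [pvMn]
  | cons c t => simp [pvMn]

theorem pvSum_append (f : Char → Int) (xs ys : List Char) :
    pvSum f (xs ++ ys) = pvSum f xs + pvSum f ys := by
  induction xs with
  | nil => simp [pvSum]
  | cons c t ih => simp [pvSum, ih]; ring

theorem pvMn_append (f : Char → Int) (xs ys : List Char) :
    pvMn f (xs ++ ys) = min (pvMn f xs) (pvSum f xs + pvMn f ys) := by
  induction xs with
  | nil =>
    have := pvMn_nonpos f ys
    simp [pvMn, pvSum]; omega
  | cons c t ih =>
    simp [pvMn, pvSum, ih]; omega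

theorem pvSum_reverse (f : Char → Int) (xs : List Char) :
    pvSum f xs.reverse = pvSum f xs := by
  induction xs with
  | nil => rfl
  | cons c t ih =>
    simp [List.reverse_cons, pvSum_append, pvSum, ih]; ring

theorem pvMn_le_sum (f : Char → Int) (xs : List Char) : pvMn f xs ≤ pvSum f xs := by
  induction xs with
  | nil => simp [pvMn, pvSum]
  | cons c t ih => simp only [pvMn, pvSum]; omega

theorem pvSum_neg (f : Char → Int) (xs : List Char) :
    pvSum (fun c => -(f c)) xs = -(pvSum f xs) := by
  induction xs with
  | nil => rfl
  | cons c t ih => simp only [pvSum, ih]; ring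

-- the key reversal identity: min-prefix of the negated reversed word
theorem pvMn_reverse_neg (f : Char → Int) (xs : List Char) :
    pvMn (fun c => -(f c)) xs.reverse = pvMn f xs - pvSum f xs := by
  induction xs with
  | nil => simp [pvMn, pvSum]
  | cons c t ih =>
    have h1 := pvMn_nonpos f t
    rw [List.reverse_cons, pvMn_append, ih, pvSum_reverse, pvSum_neg]
    simp only [pvMn, pvSum]
    omega

-- closed form of the clamp-and-count fold
theorem cmvdClamp_fold (f : Char → Int) (hf : ∀ c, f c = 1 ∨ f c = -1)
    (xs : List Char) : ∀ (b u : Int), 0 ≤ b →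
    xs.foldl (cmvdClampStep f) (b, u) =
      (b + pvSum f xs - min 0 (b + pvMn f xs), u - min 0 (b + pvMn f xs)) := by
  induction xs with
  | nil => intro b u hb; simp [pvSum, pvMn]; omega
  | cons c t ih =>
    intro b u hb
    by_cases h : b + f c < 0
    · have hstep : cmvdClampStep f (b, u) c = (0, u + 1) := by
        simp only [cmvdClampStep]; rw [if_pos h]
      rw [List.foldl_cons, hstep, ih 0 (u + 1) le_rfl]
      have hmn := pvMn_nonpos f t
      have hfc := hf c
      have key : min 0 (b + min 0 (f c + pvMn f t)) = b + (f c + pvMn f t) := by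
        rw [min_eq_right (by omega : f c + pvMn f t ≤ 0),
            min_eq_right (by omega : b + (f c + pvMn f t) ≤ 0)]
      simp only [pvSum, pvMn, Prod.mk.injEq]
      rw [key]
      constructor <;> omega
    · have hstep : cmvdClampStep f (b, u) c = (b + f c, u) := by
        simp only [cmvdClampStep]; rw [if_neg h]
      rw [List.foldl_cons, hstep, ih (b + f c) u (by omega)]
      have key : min 0 (b + min 0 (f c + pvMn f t)) = min 0 (b + f c + pvMn f t) := by
        rcases le_total 0 (f c + pvMn f t) with h' | h'
        · rw [min_eq_left h']; omega
        · rw [min_eq_right h']; omega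
      simp only [pvSum, pvMn, Prod.mk.injEq]
      rw [key]
      constructor <;> omega

-- a step that agrees with cmvdClampStep on states with nonnegative balance,
-- folded from such a state, folds like it
theorem cmvd_fold_congr (f : Char → Int) (step : Int × Int → Char → Int × Int)
    (hstep : ∀ b u c, 0 ≤ b → step (b, u) c = cmvdClampStep f (b, u) c)
    (xs : List Char) : ∀ (b u : Int), 0 ≤ b →
    xs.foldl step (b, u) = xs.foldl (cmvdClampStep f) (b, u) := by
  induction xs with
  | nil => intro b u _; rfl
  | cons c t ih =>
    intro b u hb
    rw [List.foldl_cons, List.foldl_cons, hstep b u c hb]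
    by_cases h : b + f c < 0
    · have : cmvdClampStep f (b, u) c = (0, u + 1) := by
        simp only [cmvdClampStep]; rw [if_pos h]
      rw [this]; exact ih 0 (u + 1) le_rfl
    · have : cmvdClampStep f (b, u) c = (b + f c, u) := by
        simp only [cmvdClampStep]; rw [if_neg h]
      rw [this]; exact ih (b + f c) u (by omega)

def cmvdF1 (c : Char) : Int := if c = '(' then 1 else -1

theorem cmvdF1_pm (c : Char) : cmvdF1 c = 1 ∨ cmvdF1 c = -1 := by
  unfold cmvdF1; split_ifs <;> simp

theorem cmvdF1_neg_pm (c : Char) : -(cmvdF1 c) = 1 ∨ -(cmvdF1 c) = -1 := by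
  unfold cmvdF1; split_ifs <;> simp

theorem cmvdStepA_eq (b u : Int) (c : Char) :
    cmvdStepA (b, u) c = cmvdClampStep cmvdF1 (b, u) c := by
  simp [cmvdStepA, cmvdClampStep, cmvdF1]

theorem cmvdPass1_eq (b u : Int) (c : Char) (hb : 0 ≤ b) :
    cmvdPass1Step (b, u) c = cmvdClampStep cmvdF1 (b, u) c := by
  simp only [cmvdPass1Step, cmvdClampStep, cmvdF1]
  split_ifs <;> simp_all [Prod.mk.injEq] <;> omega

theorem cmvdPass2_eq (b u : Int) (c : Char) (hb : 0 ≤ b) :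
    cmvdPass2Step (b, u) c = cmvdClampStep (fun c => -(cmvdF1 c)) (b, u) c := by
  simp only [cmvdPass2Step, cmvdClampStep, cmvdF1, ne_eq]
  split_ifs <;> simp_all [Prod.mk.injEq] <;> omega

-- ===== VERDICT (by name: the statement is the Claim_ definition above) =====
theorem can_make_valid_with_deletions_spec : Claim_equal_can_make_valid_with_deletions := by
  intro s k _
  simp only [Spec_can_make_valid_with_deletions, can_make_valid_with_deletions,
    can_make_valid_with_deletions_alt]
  have hA : s.toList.foldl cmvdStepA (0, 0) = s.toList.foldl (cmvdClampStep cmvdF1) (0, 0) :=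
    cmvd_fold_congr cmvdF1 cmvdStepA (fun b u c _ => cmvdStepA_eq b u c) s.toList 0 0 le_rfl
  have h1 : s.toList.foldl cmvdPass1Step (0, 0) = s.toList.foldl (cmvdClampStep cmvdF1) (0, 0) :=
    cmvd_fold_congr cmvdF1 cmvdPass1Step (fun b u c hb => cmvdPass1_eq b u c hb) s.toList 0 0 le_rfl
  have h2 : s.toList.reverse.foldl cmvdPass2Step (0, 0) =
      s.toList.reverse.foldl (cmvdClampStep (fun c => -(cmvdF1 c))) (0, 0) :=
    cmvd_fold_congr _ cmvdPass2Step (fun b u c hb => cmvdPass2_eq b u c hb) s.toList.reverse 0 0 le_rfl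
  rw [hA, h1, h2,
    cmvdClamp_fold cmvdF1 cmvdF1_pm s.toList 0 0 le_rfl,
    cmvdClamp_fold (fun c => -(cmvdF1 c)) cmvdF1_neg_pm s.toList.reverse 0 0 le_rfl,
    pvMn_reverse_neg cmvdF1 s.toList, pvSum_neg cmvdF1 s.toList.reverse,
    pvSum_reverse cmvdF1 s.toList]
  have hmn := pvMn_nonpos cmvdF1 s.toList
  have hms := pvMn_le_sum cmvdF1 s.toList
  simp only [zero_add, decide_eq_decide]
  omega
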